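-- pv_equiv track=rewrite | github.com/shpigunov/prjctr-algo-base-hangman | functions.py | filter_words_by_mask0
-- ===== SOURCE A (Python) =====
-- def filter_words_by_mask0(words: list, mask: str) -> list:
--     """Filter word list to a subset only matching known
--     characters in a word mask
--
--     Mask format: 'ch*r*cter'"""
--
--     res = []                # resulting list
--     mask_len = len(mask)    # mask length for reuse
--
--     for i in range(0, len(words)):
--         include = True
--         # Only include words that are the same length as mask
--         if len(words[i]) == mask_len:
--             for j in range(0, mask_len):
--                 if mask[j] != words[i][j] and mask[j] != '*':
--                     include = False
--                     break
--         else: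
--             include = False
--
--         if include:
--             res.append(words[i])
--
--     return res
-- ===== SOURCE B (Python) =====
-- def filter_words_by_mask0(words: list, mask: str) -> list:
--     """Filter word list to the words matching mask ('*' = any char),
--     by a column-wise sieve: keep same-length words, then for each
--     non-wildcard mask column make one pass over the survivors."""
--     n = len(mask)
--     cands = [w for w in words if len(w) == n]
--     for j, ch in enumerate(mask):
--         if ch != '*':
--             cands = [w for w in cands if w[j] == ch]
--     return cands
-- ===== Notes on version B (the rewrite author's own statement) =====
-- stated objective: alternative
-- what changed: B inverts the loop nesting: instead of A's per-word inner scan over the mask with a break flag, B first keeps the same-length words and then sieves the surviving candidate list column by column, one whole-list filtering pass per non-wildcard mask position.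
import Mathlib
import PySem

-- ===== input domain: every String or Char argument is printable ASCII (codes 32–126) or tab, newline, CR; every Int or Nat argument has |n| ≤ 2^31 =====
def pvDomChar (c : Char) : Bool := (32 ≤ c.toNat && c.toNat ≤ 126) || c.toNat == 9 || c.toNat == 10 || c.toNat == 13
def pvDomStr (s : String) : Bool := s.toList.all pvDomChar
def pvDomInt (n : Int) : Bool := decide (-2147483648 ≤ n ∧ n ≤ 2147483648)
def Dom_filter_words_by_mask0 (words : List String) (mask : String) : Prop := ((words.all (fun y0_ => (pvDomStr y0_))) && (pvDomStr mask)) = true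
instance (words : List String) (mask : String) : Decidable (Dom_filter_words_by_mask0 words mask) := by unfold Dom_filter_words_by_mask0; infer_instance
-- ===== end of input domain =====

-- B inverts the loop nesting: a column-wise sieve (one filtering pass over the surviving
-- candidates per non-wildcard mask position) instead of A's per-word inner scan; not claimed faster.

-- ===== PORT A =====
-- inner loop 'for j in range(0, mask_len): if mask[j] != words[i][j] and mask[j] != "*": include=False; break'
-- fuel counts the remaining iterations; indices are always in range (lengths equal), so getD is exact here.
def pvInnerA (m w : List Char) : Nat → Nat → Bool
  | 0, _ => true
  | fuel+1, j =>
    if m.getD j ' ' ≠ w.getD j ' ' ∧ m.getD j ' ' ≠ '*' then false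
    else pvInnerA m w fuel (j+1)

def filter_words_by_mask0 (words : List String) (mask : String) : List String :=
  let mask_len := mask.toList.length
  (PySem.List.pyRange 0 (words.length : Int) 1).foldl
    (fun res i =>
      let w := PySem.List.pyGetD words i ""
      let include_ :=
        if w.toList.length = mask_len then pvInnerA mask.toList w.toList mask_len 0
        else false
      if include_ then res ++ [w] else res) []

-- ===== PORT B =====
def filter_words_by_mask0_alt (words : List String) (mask : String) : List String :=
  let n := mask.toList.length
  let cands := words.filter (fun w => w.toList.length == n)
  (PySem.List.enumerate mask.toList 0).foldl
    (fun cands p =>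
      if p.2 ≠ '*' then
        cands.filter (fun w => PySem.List.pyGetD w.toList p.1 ' ' == p.2)
      else cands) cands

-- ===== PRECONDITION & SPEC =====
def Spec_filter_words_by_mask0 (words : List String) (mask : String) (out : List String) : Prop := out = filter_words_by_mask0_alt words mask
instance (words : List String) (mask : String) (out : List String) : Decidable (Spec_filter_words_by_mask0 words mask out) := by unfold Spec_filter_words_by_mask0; infer_instance

-- ===== CLAIM (what is proved, stated in full; the proofs are below) =====
def Claim_equal_filter_words_by_mask0 : Prop := ∀ (words : List String) (mask : String), Dom_filter_words_by_mask0 words mask → Spec_filter_words_by_mask0 words mask (filter_words_by_mask0 words mask)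

-- ===== LEMMAS AND PROOFS =====

-- A's inner break-loop succeeds iff every scanned position matches or is a wildcard.
theorem pvInnerA_iff (m w : List Char) : ∀ (fuel j : Nat),
    pvInnerA m w fuel j = true ↔
      ∀ k, k < fuel → (m.getD (j+k) ' ' = w.getD (j+k) ' ' ∨ m.getD (j+k) ' ' = '*') := by
  intro fuel
  induction fuel with
  | zero => intro j; simp [pvInnerA]
  | succ n ih =>
    intro j
    simp only [pvInnerA]
    split_ifs with h
    · simp only [false_iff]
      intro hall
      have := hall 0 (by omega)
      simp only [Nat.add_zero] at this
      rcases this with h1 | h1 <;> tauto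
    · rw [ih (j+1)]
      rw [not_and_or, not_not, not_not] at h
      constructor
      · intro hall k hk
        rcases Nat.eq_zero_or_pos k with rfl | hp
        · simpa using h
        · have := hall (k-1) (by omega)
          have hidx : j + 1 + (k - 1) = j + k := by omega
          rwa [hidx] at this
      · intro hall k hk
        have := hall (k+1) (by omega)
        have hidx : j + (k+1) = j + 1 + k := by omega
        rwa [hidx] at this

-- B's sieve: a fold of conditional filtering passes collapses to one filter with an 'all' predicate.
theorem pvSieve_eq_filter (ps : List (Int × Char)) (c : List String) :
    ps.foldl
      (fun cands p =>
        if p.2 ≠ '*' then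
          cands.filter (fun w => PySem.List.pyGetD w.toList p.1 ' ' == p.2)
        else cands) c
    = c.filter (fun w =>
        ps.all (fun p => p.2 == '*' || (PySem.List.pyGetD w.toList p.1 ' ' == p.2))) := by
  induction ps generalizing c with
  | nil => simp
  | cons p ps ih =>
    simp only [List.foldl_cons, List.all_cons]
    by_cases hp : p.2 = '*'
    · rw [if_neg (by simp [hp])]
      rw [ih]
      apply List.filter_congr
      intro w _
      simp [hp]
    · rw [if_pos (by simp [hp])]
      rw [ih, List.filter_filter]
      apply List.filter_congr
      intro w _
      cases h1 : (p.2 == '*') with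
      | true => simp [beq_iff_eq] at h1; exact absurd h1 hp
      | false =>
        simp only [h1, Bool.false_or]
        cases (PySem.List.pyGetD w.toList p.1 ' ' == p.2) <;> simp

-- B's 'all over enumerate' as a ∀ over mask indices.
theorem pvAll_enumerate_iff (m w : List Char) :
    ((PySem.List.enumerate m 0).all
        (fun p => p.2 == '*' || (PySem.List.pyGetD w p.1 ' ' == p.2))) = true ↔
      ∀ k, (hk : k < m.length) → (m[k] = '*' ∨ w.getD k ' ' = m[k]) := by
  rw [List.all_eq_true]
  constructor
  · intro hall k hk
    have hmem : ((0 + (k : Int)), m[k]) ∈ PySem.List.enumerate m 0 := by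
      rw [PySem.List.mem_enumerate_iff]
      exact ⟨k, hk, rfl⟩
    have := hall _ hmem
    simp only [Bool.or_eq_true, beq_iff_eq] at this
    simpa [PySem.List.pyGetD_natCast] using this
  · intro hall p hp
    rw [PySem.List.mem_enumerate_iff] at hp
    rcases hp with ⟨k, hk, rfl⟩
    simp only [Bool.or_eq_true, beq_iff_eq]
    simpa [PySem.List.pyGetD_natCast] using hall k hk

-- the two per-word predicates agree
theorem pvPred_eq (mask : String) (w : String) :
    (if w.toList.length = mask.toList.length then
        pvInnerA mask.toList w.toList mask.toList.length 0 else false) =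
      ((w.toList.length == mask.toList.length) &&
        (PySem.List.enumerate mask.toList 0).all
          (fun p => p.2 == '*' || (PySem.List.pyGetD w.toList p.1 ' ' == p.2))) := by
  by_cases hlen : w.toList.length = mask.toList.length
  · rw [if_pos hlen]
    simp only [hlen, beq_self_eq_true, Bool.true_and]
    rw [Bool.eq_iff_iff, pvInnerA_iff, pvAll_enumerate_iff]
    constructor
    · intro h k hk
      have := h k hk
      simp only [Nat.zero_add] at this
      rw [List.getD_eq_getElem _ _ hk] at this
      tauto
    · intro h k hk
      have := h k hk
      simp only [Nat.zero_add]
      rw [List.getD_eq_getElem _ _ hk]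
      tauto
  · have h0 : (w.toList.length == mask.toList.length) = false := by
      simpa using hlen
    rw [if_neg hlen, h0, Bool.false_and]

-- ===== VERDICT (by name: the statement is the Claim_ definition above) =====
theorem filter_words_by_mask0_spec : Claim_equal_filter_words_by_mask0 := by
  unfold Claim_equal_filter_words_by_mask0 Spec_filter_words_by_mask0
  intro words mask _
  unfold filter_words_by_mask0 filter_words_by_mask0_alt
  simp only []
  rw [PySem.List.foldl_pyRange_zero_pyGetD' words ""
    (fun res w =>
      if (if w.toList.length = mask.toList.length then
            pvInnerA mask.toList w.toList mask.toList.length 0 else false)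
      then res ++ [w] else res) []]
  rw [PySem.List.foldl_append_if_eq_filter]
  rw [pvSieve_eq_filter, List.filter_filter]
  simp only [List.nil_append]
  apply List.filter_congr
  intro w _
  rw [pvPred_eq, Bool.and_comm]
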